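-- pv_equiv track=rewrite | github.com/coralynnkc/cs329-group | grammaticality-2.0/scripts/score_cola.py | detect_label_col
-- ===== SOURCE A (Python) =====
-- ID_VARIANTS = {"id", "row_id", "rowid", "item_id"}
--
-- LABEL_VARIANTS = {
--     "predicted_label",
--     "prediction",
--     "label",
--     "pred",
--     "output",
--     "answer",
--     "predicted",
-- }
--
-- def detect_label_col(rows):
--     if not rows:
--         raise ValueError("Prediction file is empty.")
--     for col in rows[0].keys():
--         if col.strip().lower() in LABEL_VARIANTS:
--             return col
--     for col in rows[0].keys():
--         if col.strip().lower() not in ID_VARIANTS: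
--             return col
--     raise ValueError(f"Could not detect prediction column from {list(rows[0].keys())}")
-- ===== SOURCE B (Python) =====
-- ID_VARIANTS = {"id", "row_id", "rowid", "item_id"}
--
-- LABEL_VARIANTS = {
--     "predicted_label",
--     "prediction",
--     "label",
--     "pred",
--     "output",
--     "answer",
--     "predicted",
-- }
--
-- def detect_label_col(rows):
--     # Single pass: return a label-variant column immediately; remember the
--     # first non-ID column as a fallback for after the loop.
--     if not rows:
--         raise ValueError("Prediction file is empty.")
--     fallback = None
--     for col in rows[0].keys():
--         norm = col.strip().lower()
--         if norm in LABEL_VARIANTS: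
--             return col
--         if fallback is None and norm not in ID_VARIANTS:
--             fallback = col
--     if fallback is not None:
--         return fallback
--     raise ValueError(f"Could not detect prediction column from {list(rows[0].keys())}")
-- ===== Notes on version B (the rewrite author's own statement) =====
-- stated objective: simpler
-- what changed: B replaces A's two sequential scans over the keys with a single loop that returns a label-variant column immediately and records the first non-ID column as a deferred fallback.
import Mathlib
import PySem

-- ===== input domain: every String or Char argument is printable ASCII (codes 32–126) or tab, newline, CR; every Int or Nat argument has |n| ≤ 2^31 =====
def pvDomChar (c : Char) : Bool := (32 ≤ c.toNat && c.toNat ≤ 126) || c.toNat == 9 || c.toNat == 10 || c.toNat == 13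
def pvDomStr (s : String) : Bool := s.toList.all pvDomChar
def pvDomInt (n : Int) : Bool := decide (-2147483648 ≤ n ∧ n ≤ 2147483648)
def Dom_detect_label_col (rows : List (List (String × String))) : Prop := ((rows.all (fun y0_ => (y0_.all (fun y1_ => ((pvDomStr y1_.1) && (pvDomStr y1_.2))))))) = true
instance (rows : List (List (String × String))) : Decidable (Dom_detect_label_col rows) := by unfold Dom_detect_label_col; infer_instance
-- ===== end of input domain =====

-- B: single pass over the keys with a deferred first-non-ID fallback, replacing A's two scans (simpler).
-- Pre_ excludes exactly the inputs where A raises ValueError (empty rows, or every key normalizing into ID_VARIANTS with none in LABEL_VARIANTS); B raises the same errors there.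


-- shared module constants (the Python sets ID_VARIANTS / LABEL_VARIANTS) and key normalization
def pvIdVariants : List String := ["id", "row_id", "rowid", "item_id"]
def pvLabelVariants : List String :=
  ["predicted_label", "prediction", "label", "pred", "output", "answer", "predicted"]
def pvNorm (s : String) : String := PySem.Str.lower (PySem.Str.strip s)

-- ===== PORT A =====
-- A: first scan for a label-variant key, then a second scan for a non-ID key; a raise is ""
-- (those inputs are excluded by Pre_). rows[0].keys() = (PySem.Dict.ofList r0).keys.
def detect_label_col (rows : List (List (String × String))) : String :=
  match rows with
  | [] => ""  -- raise ValueError("Prediction file is empty.")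
  | r0 :: _ =>
    let ks := (PySem.Dict.ofList r0).keys
    match ks.find? (fun col => decide (pvNorm col ∈ pvLabelVariants)) with
    | some col => col
    | none =>
      match ks.find? (fun col => decide (pvNorm col ∉ pvIdVariants)) with
      | some col => col
      | none => ""  -- raise ValueError(f"Could not detect prediction column from …")

-- ===== PORT B =====
-- B's loop: return a label column at once, else thread the first non-ID key as fallback.
def detectGo (ks : List String) (fallback : Option String) : String :=
  match ks with
  | [] =>
    match fallback with
    | some f => f
    | none => ""  -- raise ValueError(f"Could not detect prediction column from …")
  | col :: rest =>
    let norm := pvNorm col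
    if norm ∈ pvLabelVariants then col
    else if fallback.isNone ∧ norm ∉ pvIdVariants then detectGo rest (some col)
    else detectGo rest fallback

def detect_label_col_alt (rows : List (List (String × String))) : String :=
  match rows with
  | [] => ""  -- raise ValueError("Prediction file is empty.")
  | r0 :: _ => detectGo (PySem.Dict.ofList r0).keys none

-- ===== PRECONDITION & SPEC =====
-- Pre_: exactly where the Python A returns (not empty, and some key of rows[0] is a
-- label variant or not an ID variant); both Pythons raise ValueError elsewhere.
def Pre_detect_label_col (rows : List (List (String × String))) : Prop :=
  rows ≠ [] ∧
    ∃ col ∈ (PySem.Dict.ofList (rows.headD [])).keys,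
      pvNorm col ∈ pvLabelVariants ∨ pvNorm col ∉ pvIdVariants
instance (rows : List (List (String × String))) : Decidable (Pre_detect_label_col rows) := by
  unfold Pre_detect_label_col; infer_instance
def pvWitness_detect_label_col : (List (List (String × String))) := [[("label", "1")]]
def Spec_detect_label_col (rows : List (List (String × String))) (out : String) : Prop := out = detect_label_col_alt rows
instance (rows : List (List (String × String))) (out : String) : Decidable (Spec_detect_label_col rows out) := by unfold Spec_detect_label_col; infer_instance

-- ===== CLAIM (what is proved, stated in full; the proofs are below) =====
def Claim_equal_detect_label_col : Prop := ∀ (rows : List (List (String × String))), Dom_detect_label_col rows → Pre_detect_label_col rows → Spec_detect_label_col rows (detect_label_col rows)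

-- ===== LEMMAS AND PROOFS =====

-- B's single loop computes A's two-scan result, for any threaded fallback.
theorem detectGo_eq (ks : List String) (fb : Option String) :
    detectGo ks fb =
      match ks.find? (fun col => decide (pvNorm col ∈ pvLabelVariants)) with
      | some col => col
      | none =>
        match fb with
        | some f => f
        | none =>
          match ks.find? (fun col => decide (pvNorm col ∉ pvIdVariants)) with
          | some col => col
          | none => "" := by
  induction ks generalizing fb with
  | nil => cases fb <;> simp [detectGo]
  | cons c rest ih =>
    by_cases hl : pvNorm c ∈ pvLabelVariants
    · simp [detectGo, hl, List.find?]
    · by_cases hid : pvNorm c ∈ pvIdVariants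
      · cases fb <;>
          simp [detectGo, hl, hid, List.find?, ih]
      · cases fb <;>
          simp [detectGo, hl, hid, List.find?, ih]

-- ===== VERDICT (by name: the statement is the Claim_ definition above) =====

theorem detect_label_col_spec : Claim_equal_detect_label_col := by
  intro rows _ hpre
  unfold Spec_detect_label_col
  match rows with
  | [] => exact absurd rfl hpre.1
  | r0 :: rest =>
    simp only [detect_label_col, detect_label_col_alt, detectGo_eq]
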